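-- pv_equiv track=rewrite | github.com/AxpeConsultingDataIA/ufd-dataia-deteccion-fraude | src/pipeline_build_snapshot.py | _infer_id_column
-- ===== SOURCE A (Python) =====
-- from typing import Iterable, Optional, Tuple, List, Dict
--
-- def _infer_id_column(cols: Iterable[str]) -> Optional[str]:
--     for cand in ["cups_sgc", "nis_rad", "CUPS", "cups", "nis", "NIS"]:
--         if cand in cols:
--             return cand
--     # fallback: primera columna que contenga 'cup' o 'nis'
--     for c in cols:
--         lc = c.lower()
--         if "cup" in lc or "nis" in lc:
--             return c
--     return None
-- ===== SOURCE B (Python) =====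
-- def _infer_id_column(cols):
--     cands = ["cups_sgc", "nis_rad", "CUPS", "cups", "nis", "NIS"]
--     rank = {c: i for i, c in enumerate(cands)}
--     best = 6            # 6 = no exact candidate seen yet
--     first_sub = None    # first column whose lowercase contains 'cup' or 'nis'
--     for c in cols:
--         r = rank.get(c, 6)
--         if r < best:
--             best = r
--         if first_sub is None:
--             lc = c.lower()
--             if "cup" in lc or "nis" in lc:
--                 first_sub = c
--     if best < 6:
--         return cands[best]
--     return first_sub
-- ===== Notes on version B (the rewrite author's own statement) =====
-- stated objective: alternative
-- what changed: A's two scans (six sequential membership tests over cols, then a fallback scan for a 'cup'/'nis' substring) are collapsed into one pass over cols that keeps the lowest priority rank from a precomputed rank dict together with the first substring match, assembling the result afterwards.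
import Mathlib
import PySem

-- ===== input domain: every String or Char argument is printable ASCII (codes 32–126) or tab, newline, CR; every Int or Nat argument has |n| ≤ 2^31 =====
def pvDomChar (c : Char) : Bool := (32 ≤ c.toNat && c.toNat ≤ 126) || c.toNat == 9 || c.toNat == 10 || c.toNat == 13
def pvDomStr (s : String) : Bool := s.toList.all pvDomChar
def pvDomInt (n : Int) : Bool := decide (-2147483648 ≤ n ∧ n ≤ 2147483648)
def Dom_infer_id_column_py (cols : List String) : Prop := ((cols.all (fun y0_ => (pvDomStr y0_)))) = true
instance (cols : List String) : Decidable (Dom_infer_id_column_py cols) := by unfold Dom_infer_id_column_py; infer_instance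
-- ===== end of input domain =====

-- B replaces A's two scans (six membership tests, then a fallback scan) by one indexed pass
-- maintaining the lowest-rank exact match and the first substring match (objective: alternative).

-- ===== PORT A =====
-- 'cup'/'nis' substring test on the lowercased column (identical inline code in both Pythons)
def lowerHasCupNis (c : String) : Bool :=
  PySem.Str.isIn "cup" (PySem.Str.lower c) || PySem.Str.isIn "nis" (PySem.Str.lower c)

-- A's fallback loop: first column containing 'cup' or 'nis' (lowercased)
def inferFallback : List String → Option String
  | [] => none
  | c :: rest => if lowerHasCupNis c then some c else inferFallback rest

def infer_id_column_py (cols : List String) : Option String :=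
  if "cups_sgc" ∈ cols then some "cups_sgc"
  else if "nis_rad" ∈ cols then some "nis_rad"
  else if "CUPS" ∈ cols then some "CUPS"
  else if "cups" ∈ cols then some "cups"
  else if "nis" ∈ cols then some "nis"
  else if "NIS" ∈ cols then some "NIS"
  else inferFallback cols

-- ===== PORT B =====
def pvCands : List String := ["cups_sgc", "nis_rad", "CUPS", "cups", "nis", "NIS"]

-- {c: i for i, c in enumerate(cands)}
def pvRank : PySem.Dict String Int :=
  PySem.Dict.ofList ((PySem.List.enumerate pvCands).map (fun p => (p.2, p.1)))

-- one loop iteration over state (best, first_sub)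
def pvStepB (st : Int × Option String) (c : String) : Int × Option String :=
  let r := pvRank.getD c 6
  ( if r < st.1 then r else st.1
  , match st.2 with
    | some x => some x
    | none => if lowerHasCupNis c then some c else none )

def infer_id_column_py_alt (cols : List String) : Option String :=
  let st := cols.foldl pvStepB (6, none)
  if st.1 < 6 then some (PySem.List.pyGetD pvCands st.1 "") else st.2

-- ===== PRECONDITION & SPEC =====
def Spec_infer_id_column_py (cols : List String) (out : Option String) : Prop := out = infer_id_column_py_alt cols
instance (cols : List String) (out : Option String) : Decidable (Spec_infer_id_column_py cols out) := by unfold Spec_infer_id_column_py; infer_instance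

-- ===== CLAIM (what is proved, stated in full; the proofs are below) =====
def Claim_equal_infer_id_column_py : Prop := ∀ (cols : List String), Dom_infer_id_column_py cols → Spec_infer_id_column_py cols (infer_id_column_py cols)

-- ===== LEMMAS AND PROOFS =====

-- the two independent components of B's loop step
def pvStepBest (b : Int) (c : String) : Int :=
  if pvRank.getD c 6 < b then pvRank.getD c 6 else b

def pvStepSub (s : Option String) (c : String) : Option String :=
  match s with
  | some x => some x
  | none => if lowerHasCupNis c then some c else none

-- the priority rank A's cascade assigns to a column list (6 = no exact candidate)
def pvChain (cols : List String) : Int :=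
  if "cups_sgc" ∈ cols then 0
  else if "nis_rad" ∈ cols then 1
  else if "CUPS" ∈ cols then 2
  else if "cups" ∈ cols then 3
  else if "nis" ∈ cols then 4
  else if "NIS" ∈ cols then 5
  else 6

lemma pvFold_split (cols : List String) : ∀ (b : Int) (s : Option String),
    cols.foldl pvStepB (b, s) = (cols.foldl pvStepBest b, cols.foldl pvStepSub s) := by
  induction cols with
  | nil => intro b s; rfl
  | cons c cs ih =>
    intro b s
    show cs.foldl pvStepB (pvStepB (b, s) c) = _
    rw [show pvStepB (b, s) c = (pvStepBest b c, pvStepSub s c) from rfl, ih]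
    rfl

lemma pvSub_some (cols : List String) (x : String) :
    cols.foldl pvStepSub (some x) = some x := by
  induction cols with
  | nil => rfl
  | cons c cs ih => simpa [pvStepSub] using ih

lemma pvSub_none (cols : List String) :
    cols.foldl pvStepSub none = inferFallback cols := by
  induction cols with
  | nil => rfl
  | cons c cs ih =>
    show cs.foldl pvStepSub (pvStepSub none c) = _
    by_cases h : lowerHasCupNis c
    · simp [pvStepSub, inferFallback, h, pvSub_some]
    · simp [pvStepSub, inferFallback, h, ih]

lemma pvRank_eval (c : String) :
    pvRank.getD c 6 =
      (if c = "cups_sgc" then 0 else if c = "nis_rad" then 1 else if c = "CUPS" then 2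
       else if c = "cups" then 3 else if c = "nis" then 4 else if c = "NIS" then 5 else 6) := by
  have h : pvRank = PySem.Dict.mk
      [("cups_sgc", 0), ("nis_rad", 1), ("CUPS", 2), ("cups", 3), ("nis", 4), ("NIS", 5)] := by
    decide
  by_cases h0 : c = "cups_sgc"
  · subst h0; decide
  by_cases h1 : c = "nis_rad"
  · subst h1; decide
  by_cases h2 : c = "CUPS"
  · subst h2; decide
  by_cases h3 : c = "cups"
  · subst h3; decide
  by_cases h4 : c = "nis"
  · subst h4; decide
  by_cases h5 : c = "NIS"
  · subst h5; decide
  · rw [h]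
    have b0 : ("cups_sgc" == c) = false := beq_eq_false_iff_ne.mpr (Ne.symm h0)
    have b1 : ("nis_rad" == c) = false := beq_eq_false_iff_ne.mpr (Ne.symm h1)
    have b2 : ("CUPS" == c) = false := beq_eq_false_iff_ne.mpr (Ne.symm h2)
    have b3 : ("cups" == c) = false := beq_eq_false_iff_ne.mpr (Ne.symm h3)
    have b4 : ("nis" == c) = false := beq_eq_false_iff_ne.mpr (Ne.symm h4)
    have b5 : ("NIS" == c) = false := beq_eq_false_iff_ne.mpr (Ne.symm h5)
    simp [PySem.Dict.getD, PySem.Dict.get?, List.find?, b0, b1, b2, b3, b4, b5, h0, h1, h2, h3, h4, h5]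

lemma pvChain_bounds (cols : List String) : 0 ≤ pvChain cols ∧ pvChain cols ≤ 6 := by
  unfold pvChain; split_ifs <;> omega

lemma pvChain_cons (c : String) (cs : List String) :
    pvChain (c :: cs) = min (pvRank.getD c 6) (pvChain cs) := by
  rw [pvRank_eval]
  by_cases h0 : c = "cups_sgc"
  · subst h0; simp [pvChain, List.mem_cons, min_def]; split_ifs <;> omega
  by_cases h1 : c = "nis_rad"
  · subst h1; simp [pvChain, List.mem_cons, min_def]; split_ifs <;> omega
  by_cases h2 : c = "CUPS"
  · subst h2; simp [pvChain, List.mem_cons, min_def]; split_ifs <;> omega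
  by_cases h3 : c = "cups"
  · subst h3; simp [pvChain, List.mem_cons, min_def]; split_ifs <;> omega
  by_cases h4 : c = "nis"
  · subst h4; simp [pvChain, List.mem_cons, min_def]; split_ifs <;> omega
  by_cases h5 : c = "NIS"
  · subst h5; simp [pvChain, List.mem_cons, min_def]; split_ifs <;> omega
  · simp [pvChain, List.mem_cons, min_def,
      Ne.symm h0, Ne.symm h1, Ne.symm h2, Ne.symm h3, Ne.symm h4, Ne.symm h5]
    split_ifs <;> omega

lemma pvBest_eq (cols : List String) : ∀ b : Int, b ≤ 6 →
    cols.foldl pvStepBest b = min b (pvChain cols) := by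
  induction cols with
  | nil =>
    intro b hb
    show b = min b (pvChain [])
    simp [pvChain]
    omega
  | cons c cs ih =>
    intro b hb
    show cs.foldl pvStepBest (pvStepBest b c) = _
    have hle : pvStepBest b c ≤ 6 := by unfold pvStepBest; split_ifs <;> omega
    rw [ih _ hle, pvChain_cons]
    unfold pvStepBest; simp only [min_def]; split_ifs <;> omega

-- ===== VERDICT (by name: the statement is the Claim_ definition above) =====
theorem infer_id_column_py_spec : Claim_equal_infer_id_column_py := by
  intro cols _
  show infer_id_column_py cols = infer_id_column_py_alt cols
  simp only [infer_id_column_py_alt]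
  rw [pvFold_split, pvSub_none, pvBest_eq cols 6 (le_refl 6)]
  have h6 : min (6 : Int) (pvChain cols) = pvChain cols := by
    have := pvChain_bounds cols; omega
  rw [h6]
  unfold infer_id_column_py pvChain
  split_ifs <;> first | rfl | decide | omega
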